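-- pv_equiv track=rewrite | github.com/mkaseb3010/bug-detector | Bug Detector/detector.py | get_frequency_pairs
-- ===== SOURCE A (Python) =====
-- def get_frequency_pairs(call_pairs, method_pairs):
--     frequency_pair = {}
--     for caller, callees in call_pairs.items():
--         callees_len = list(callees)
--         for i in range(len(callees_len)):
--             for j in range(i + 1, len(callees_len)):
--                 part1 = (callees_len[i], callees_len[j])
--                 part2 = (callees_len[j], callees_len[i])
--                 frequency_pair[part1] = frequency_pair.get(part1, 0) + 1
--                 frequency_pair[part2] = frequency_pair.get(part2, 0) + 1
--     return frequency_pair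
-- ===== SOURCE B (Python) =====
-- def get_frequency_pairs(call_pairs, method_pairs):
--     # For each position, aggregate the remaining suffix into a multiplicity
--     # table and add whole counts at once (2*c for a repeated value, c for
--     # each ordered cross pair) instead of enumerating every position pair.
--     frequency_pair = {}
--     for callees in call_pairs.values():
--         rest = list(callees)
--         while rest:
--             x = rest.pop(0)
--             counts = {}
--             for y in rest:
--                 counts[y] = counts.get(y, 0) + 1
--             for y, c in counts.items():
--                 if y == x:
--                     frequency_pair[(x, x)] = frequency_pair.get((x, x), 0) + 2 * c
--                 else:
--                     frequency_pair[(x, y)] = frequency_pair.get((x, y), 0) + c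
--                     frequency_pair[(y, x)] = frequency_pair.get((y, x), 0) + c
--     return frequency_pair
-- ===== Notes on version B (the rewrite author's own statement) =====
-- stated objective: alternative
-- what changed: Per caller, B consumes the callee list front-to-back and, for each element, aggregates the remaining suffix into a multiplicity table, adding whole counts at once (2*c for the repeated value, c for each ordered cross pair) instead of enumerating every position pair with two nested index loops.
import Mathlib
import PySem

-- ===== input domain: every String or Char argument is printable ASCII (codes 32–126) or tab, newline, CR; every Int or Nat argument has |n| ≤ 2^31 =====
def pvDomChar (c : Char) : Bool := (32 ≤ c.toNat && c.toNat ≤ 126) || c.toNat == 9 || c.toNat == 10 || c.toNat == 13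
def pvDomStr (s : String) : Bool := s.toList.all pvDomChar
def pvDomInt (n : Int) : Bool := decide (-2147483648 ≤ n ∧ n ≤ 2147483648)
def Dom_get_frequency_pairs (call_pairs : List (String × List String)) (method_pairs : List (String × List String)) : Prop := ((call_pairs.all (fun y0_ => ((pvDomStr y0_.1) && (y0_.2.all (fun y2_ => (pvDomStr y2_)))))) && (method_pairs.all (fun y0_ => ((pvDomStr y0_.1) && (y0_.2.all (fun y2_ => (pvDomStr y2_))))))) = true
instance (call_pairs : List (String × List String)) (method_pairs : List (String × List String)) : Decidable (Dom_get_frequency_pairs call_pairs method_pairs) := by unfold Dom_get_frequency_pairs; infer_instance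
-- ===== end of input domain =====

-- B replaces A's inner position-pair enumeration by a multiplicity table of the
-- remaining suffix (alternative algorithm, same exact result incl. dict order).

-- ===== PORT A =====
def get_frequency_pairs (call_pairs : List (String × List String)) (method_pairs : List (String × List String)) : List (String × String × Int) :=
  let frequency_pair : PySem.Dict (String × String) Int := PySem.Dict.empty
  let frequency_pair := call_pairs.foldl (fun fp kv =>
    let callees_len := kv.2
    (PySem.List.pyRange 0 (PySem.List.len callees_len)).foldl (fun fp i =>
      (PySem.List.pyRange (i + 1) (PySem.List.len callees_len)).foldl (fun fp j =>
        let part1 := (PySem.List.pyGetD callees_len i "", PySem.List.pyGetD callees_len j "")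
        let part2 := (PySem.List.pyGetD callees_len j "", PySem.List.pyGetD callees_len i "")
        let fp := fp.insert part1 (fp.getD part1 0 + 1)
        fp.insert part2 (fp.getD part2 0 + 1)) fp) fp) frequency_pair
  frequency_pair.items.map (fun p => (p.1.1, p.1.2, p.2))

-- ===== PORT B =====
-- body of B's while loop: pop the front element x, count the suffix, add whole counts
def pvAltBlock (fp : PySem.Dict (String × String) Int) (x : String) (rest : List String) : PySem.Dict (String × String) Int :=
  let counts : PySem.Dict String Int := rest.foldl (fun m y => m.insert y (m.getD y 0 + 1)) PySem.Dict.empty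
  counts.items.foldl (fun fp yc =>
    if yc.1 == x then fp.insert (x, x) (fp.getD (x, x) 0 + 2 * yc.2)
    else
      let fp := fp.insert (x, yc.1) (fp.getD (x, yc.1) 0 + yc.2)
      fp.insert (yc.1, x) (fp.getD (yc.1, x) 0 + yc.2)) fp

-- B's 'while rest: x = rest.pop(0)' loop
def pvAltLoop (fp : PySem.Dict (String × String) Int) : List String → PySem.Dict (String × String) Int
  | [] => fp
  | x :: rest => pvAltLoop (pvAltBlock fp x rest) rest

def get_frequency_pairs_alt (call_pairs : List (String × List String)) (method_pairs : List (String × List String)) : List (String × String × Int) :=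
  (call_pairs.foldl (fun fp kv => pvAltLoop fp kv.2) PySem.Dict.empty).items.map (fun p => (p.1.1, p.1.2, p.2))

-- ===== PRECONDITION & SPEC =====
def Spec_get_frequency_pairs (call_pairs : List (String × List String)) (method_pairs : List (String × List String)) (out : List (String × String × Int)) : Prop := out = get_frequency_pairs_alt call_pairs method_pairs
instance (call_pairs : List (String × List String)) (method_pairs : List (String × List String)) (out : List (String × String × Int)) : Decidable (Spec_get_frequency_pairs call_pairs method_pairs out) := by unfold Spec_get_frequency_pairs; infer_instance

-- ===== CLAIM (what is proved, stated in full; the proofs are below) =====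
def Claim_equal_get_frequency_pairs : Prop := ∀ (call_pairs : List (String × List String)) (method_pairs : List (String × List String)), Dom_get_frequency_pairs call_pairs method_pairs → Spec_get_frequency_pairs call_pairs method_pairs (get_frequency_pairs call_pairs method_pairs)

-- ===== LEMMAS AND PROOFS =====
def pvBump (d : PySem.Dict (String × String) Int) (k : String × String) (n : Int) : PySem.Dict (String × String) Int :=
  d.insert k (d.getD k 0 + n)

theorem pv_insert_comm_of_contains (d : PySem.Dict (String × String) Int) (k k' : String × String) (v v' : Int)
    (hne : k ≠ k') (hc : d.contains k = true) :
    (d.insert k' v').insert k v = (d.insert k v).insert k' v' := by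
  apply PySem.Dict.ext
  by_cases hc' : d.contains k' = true
  · rw [PySem.Dict.items_insert, PySem.Dict.items_insert, PySem.Dict.items_insert, PySem.Dict.items_insert]
    simp [PySem.Dict.contains_insert, hc, hc', List.map_map]
    intro a b c _
    by_cases h1 : (a, b) = k <;> by_cases h2 : (a, b) = k' <;> simp_all
  · rw [PySem.Dict.items_insert, PySem.Dict.items_insert, PySem.Dict.items_insert, PySem.Dict.items_insert]
    simp [PySem.Dict.contains_insert, hc, hc', Ne.symm hne]

theorem pv_bump_comm_of_contains (d : PySem.Dict (String × String) Int) (k k' : String × String) (n n' : Int)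
    (hne : k ≠ k') (hc : d.contains k = true) :
    pvBump (pvBump d k' n') k n = pvBump (pvBump d k n) k' n' := by
  unfold pvBump
  rw [PySem.Dict.getD_insert_of_ne _ _ _ hne, PySem.Dict.getD_insert_of_ne _ _ _ (Ne.symm hne)]
  exact pv_insert_comm_of_contains _ _ _ _ _ hne hc
theorem pv_bump_bump_same (d : PySem.Dict (String × String) Int) (k : String × String) (m n : Int) :
    pvBump (pvBump d k m) k n = pvBump d k (m + n) := by
  simp [pvBump, PySem.Dict.getD_insert_self, PySem.Dict.insert_insert_self, add_assoc]

theorem pv_contains_bump (d : PySem.Dict (String × String) Int) (k k' : String × String) (n : Int)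
    (hc : d.contains k = true) : (pvBump d k' n).contains k = true := by
  simp [pvBump, PySem.Dict.contains_insert, hc]

theorem pv_contains_bump_self (d : PySem.Dict (String × String) Int) (k : String × String) (n : Int) :
    (pvBump d k n).contains k = true := by
  simp [pvBump]

theorem pv_nodup_bump (d : PySem.Dict (String × String) Int) (k : String × String) (n : Int)
    (h : d.keys.Nodup) : (pvBump d k n).keys.Nodup := by
  exact PySem.Dict.nodup_keys_insert _ _ _ h

theorem pv_bump_zero (d : PySem.Dict (String × String) Int) (k : String × String)
    (h : d.keys.Nodup) (hc : d.contains k = true) : pvBump d k 0 = d := by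
  apply PySem.Dict.ext
  rw [pvBump, PySem.Dict.items_insert]
  simp [hc]
  nth_rewrite 2 [← List.map_id d.items]
  apply List.map_congr_left
  intro p hmem
  by_cases h1 : p.1 = k
  · have hm2 : (k, p.2) ∈ d.items := by rw [← h1]; exact hmem
    have := PySem.Dict.getD_of_mem_items (d := d) (k := k) (v := p.2) hm2 h
    subst h1
    simp [this]
  · simp [h1]

def pvGstep (x : String) (d : PySem.Dict (String × String) Int) (y : String) (n : Int) : PySem.Dict (String × String) Int :=
  if y = x then pvBump d (x, x) (2 * n) else pvBump (pvBump d (x, y) n) (y, x) n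

theorem pv_contains_gstep (x : String) (d : PySem.Dict (String × String) Int) (z : String) (n : Int)
    (k : String × String) (hc : d.contains k = true) : (pvGstep x d z n).contains k = true := by
  unfold pvGstep
  split <;> simp [pv_contains_bump, hc]

theorem pv_contains_gstep_self₁ (x : String) (d : PySem.Dict (String × String) Int) (y : String) (n : Int) :
    (pvGstep x d y n).contains (x, y) = true := by
  unfold pvGstep
  split
  · next h => subst h; exact pv_contains_bump_self ..
  · exact pv_contains_bump _ _ _ _ (pv_contains_bump_self ..)

theorem pv_contains_gstep_self₂ (x : String) (d : PySem.Dict (String × String) Int) (y : String) (n : Int) :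
    (pvGstep x d y n).contains (y, x) = true := by
  unfold pvGstep
  split
  · next h => subst h; exact pv_contains_bump_self ..
  · exact pv_contains_bump_self ..

theorem pv_nodup_gstep (x : String) (d : PySem.Dict (String × String) Int) (y : String) (n : Int)
    (h : d.keys.Nodup) : (pvGstep x d y n).keys.Nodup := by
  unfold pvGstep
  split <;> simp [pv_nodup_bump, h]

theorem pv_gstep_add (x : String) (d : PySem.Dict (String × String) Int) (y : String) (m n : Int) :
    pvGstep x (pvGstep x d y m) y n = pvGstep x d y (m + n) := by
  unfold pvGstep
  split
  · next h => rw [pv_bump_bump_same]; ring_nf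
  · next h =>
    have hk : ((x, y) : String × String) ≠ (y, x) := by
      simp [Prod.ext_iff]; intro h1; exact absurd h1.symm h
    rw [pv_bump_comm_of_contains _ _ _ _ _ hk (pv_contains_bump_self ..), pv_bump_bump_same]
    rw [pv_bump_bump_same]

theorem pv_gstep_zero (x : String) (d : PySem.Dict (String × String) Int) (y : String)
    (h : d.keys.Nodup) (h1 : d.contains (x, y) = true) (h2 : d.contains (y, x) = true) :
    pvGstep x d y 0 = d := by
  unfold pvGstep
  split
  · next hyx => subst hyx; simpa using pv_bump_zero d (y, y) h h1
  · rw [pv_bump_zero d (x, y) h h1]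
    exact pv_bump_zero d (y, x) h h2
theorem pv_ne_aux {a b c d : String} (h : a ≠ c ∨ b ≠ d) : ((a, b) : String × String) ≠ (c, d) := by
  intro h'
  rcases h with h | h <;> simp_all [Prod.ext_iff]

theorem pv_gstep_comm (x : String) (d : PySem.Dict (String × String) Int) (y z : String) (m n : Int)
    (hzy : z ≠ y) (h1 : d.contains (x, y) = true) (h2 : d.contains (y, x) = true) :
    pvGstep x (pvGstep x d z n) y m = pvGstep x (pvGstep x d y m) z n := by
  unfold pvGstep
  by_cases hyx : y = x
  · subst hyx
    rw [if_pos rfl, if_pos rfl, if_neg hzy, if_neg hzy]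
    rw [pv_bump_comm_of_contains _ _ _ _ _ (pv_ne_aux (Or.inl (Ne.symm hzy)))
          (pv_contains_bump _ _ _ _ h1)]
    rw [pv_bump_comm_of_contains _ _ _ _ _ (pv_ne_aux (Or.inr (Ne.symm hzy))) h1]
  · rw [if_neg hyx, if_neg hyx]
    by_cases hzx : z = x
    · subst hzx
      rw [if_pos rfl, if_pos rfl]
      rw [pv_bump_comm_of_contains _ _ _ _ _ (pv_ne_aux (Or.inr hyx)) h1]
      rw [pv_bump_comm_of_contains _ _ _ _ _ (pv_ne_aux (Or.inl hyx))
            (pv_contains_bump _ _ _ _ h2)]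
    · rw [if_neg hzx, if_neg hzx]
      rw [pv_bump_comm_of_contains _ _ _ _ _ (pv_ne_aux (Or.inr hyx))
            (pv_contains_bump _ _ _ _ h1)]
      rw [pv_bump_comm_of_contains _ _ _ _ _ (pv_ne_aux (Or.inr (Ne.symm hzy))) h1]
      rw [pv_bump_comm_of_contains _ _ _ _ _ (pv_ne_aux (Or.inl (Ne.symm hzy)))
            (pv_contains_bump _ _ _ _ (pv_contains_bump _ _ _ _ h2))]
      rw [pv_bump_comm_of_contains _ _ _ _ _ (pv_ne_aux (Or.inl hyx))
            (pv_contains_bump _ _ _ _ h2)]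
def pvF (x : String) (d : PySem.Dict (String × String) Int) (l : List String) : PySem.Dict (String × String) Int :=
  l.foldl (fun d y => pvGstep x d y 1) d

theorem pv_pull (x y : String) : ∀ (l : List String) (D : PySem.Dict (String × String) Int),
    D.keys.Nodup → D.contains (x, y) = true → D.contains (y, x) = true →
    pvF x D l = pvF x (pvGstep x D y ((l.count y : Nat) : Int)) (l.filter (fun z => z != y)) := by
  intro l
  induction l with
  | nil => intro D hnd h1 h2; simp [pvF, pv_gstep_zero x D y hnd h1 h2]
  | cons z t ih =>
    intro D hnd h1 h2
    by_cases hz : z = y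
    · subst hz
      have step : pvF x D (z :: t) = pvF x (pvGstep x D z 1) t := rfl
      rw [step, ih (pvGstep x D z 1) (pv_nodup_gstep _ _ _ _ hnd)
            (pv_contains_gstep _ _ _ _ _ h1) (pv_contains_gstep _ _ _ _ _ h2),
          pv_gstep_add]
      simp only [List.count_cons_self, List.filter_cons, bne_self_eq_false]
      norm_num [add_comm]
    · have step : pvF x D (z :: t) = pvF x (pvGstep x D z 1) t := rfl
      rw [step, ih (pvGstep x D z 1) (pv_nodup_gstep _ _ _ _ hnd)
            (pv_contains_gstep _ _ _ _ _ h1) (pv_contains_gstep _ _ _ _ _ h2),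
          pv_gstep_comm x D y z _ _ hz h1 h2]
      have hcount : (z :: t).count y = t.count y := by simp [List.count_cons, hz]
      have hfil : (z :: t).filter (fun w => w != y) = z :: t.filter (fun w => w != y) := by
        simp [List.filter_cons, hz]
      rw [hcount, hfil]
      rfl
theorem pv_set_add_mem (s : PySem.Set String) (y z : String) (h : y ∈ s) : y ∈ PySem.Set.add s z := by
  simp only [PySem.Set.add]
  split
  · exact h
  · exact List.mem_append_left _ h

theorem pv_set_foldl_skip (y : String) : ∀ (r : List String) (s : PySem.Set String),
    y ∈ s →
    r.foldl PySem.Set.add s = (r.filter (fun z => z != y)).foldl PySem.Set.add s := by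
  intro r
  induction r with
  | nil => intro s h; rfl
  | cons z t ih =>
    intro s h
    by_cases hz : z = y
    · subst hz
      have hadd : PySem.Set.add s z = s := by
        simp [PySem.Set.add, PySem.Set.contains, List.contains_iff_mem, h]
      have hfil : (z :: t).filter (fun w => w != z) = t.filter (fun w => w != z) := by
        simp [List.filter_cons]
      rw [hfil, List.foldl_cons, hadd]
      exact ih s h
    · have hfil : (z :: t).filter (fun w => w != y) = z :: t.filter (fun w => w != y) := by
        simp [List.filter_cons, hz]
      rw [hfil, List.foldl_cons, List.foldl_cons]
      exact ih _ (pv_set_add_mem s y z h)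

theorem pv_set_foldl_head (y : String) : ∀ (l : List String) (s : PySem.Set String),
    (∀ z ∈ l, z ≠ y) →
    l.foldl PySem.Set.add (y :: s) = y :: l.foldl PySem.Set.add s := by
  intro l
  induction l with
  | nil => intro s _; rfl
  | cons z t ih =>
    intro s hall
    have hz : z ≠ y := hall z (List.mem_cons_self)
    have hstep : PySem.Set.add (y :: s) z = y :: PySem.Set.add s z := by
      simp only [PySem.Set.add, PySem.Set.contains, List.contains_iff_mem, List.mem_cons]
      by_cases hc : z ∈ s
      · rw [if_pos (by simp [hc]), if_pos (by simp [hc])]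
      · rw [if_neg (by simp [hc, Ne.symm hz]; exact fun h => absurd h hz), if_neg (by simpa using hc)]
        rfl
    simp only [List.foldl_cons, hstep]
    exact ih _ (fun w hw => hall w (List.mem_cons_of_mem _ hw))

theorem pv_set_ofList_cons (y : String) (r : List String) :
    PySem.Set.ofList (y :: r) = y :: PySem.Set.ofList (r.filter (fun z => z != y)) := by
  show ((y :: r).foldl PySem.Set.add PySem.Set.empty : List String) = _
  have h0 : PySem.Set.add PySem.Set.empty y = [y] := rfl
  rw [List.foldl_cons, h0, pv_set_foldl_skip y r [y] (by simp)]
  rw [pv_set_foldl_head y _ [] (by intro z hz; have := List.of_mem_filter hz; simpa using this)]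
  rfl
theorem pv_counter_cons (y : String) (r : List String) :
    (PySem.Dict.counter (y :: r)).items
      = (y, (((y :: r).count y : Nat) : Int)) :: (PySem.Dict.counter (r.filter (fun z => z != y))).items := by
  rw [PySem.Dict.items_counter, PySem.Dict.items_counter, pv_set_ofList_cons]
  simp only [List.map_cons, List.count_cons_self]
  congr 1
  apply List.map_congr_left
  intro k hk
  have hkf : k ∈ r.filter (fun z => z != y) := (PySem.Set.mem_ofList _ _).1 hk
  have hkn : (k != y) = true := (List.mem_filter.mp hkf).2
  have hkny : k ≠ y := by simpa using hkn
  have h1 : List.count k (y :: r) = List.count k r := by simp [List.count_cons, Ne.symm hkny]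
  have h2 : List.count k (r.filter (fun z => z != y)) = List.count k r := List.count_filter hkn
  rw [h1, ← h2]

def pvBfold (x : String) (L : List (String × Int)) (d : PySem.Dict (String × String) Int) : PySem.Dict (String × String) Int :=
  L.foldl (fun fp yc =>
    if yc.1 == x then fp.insert (x, x) (fp.getD (x, x) 0 + 2 * yc.2)
    else
      let fp := fp.insert (x, yc.1) (fp.getD (x, yc.1) 0 + yc.2)
      fp.insert (yc.1, x) (fp.getD (yc.1, x) 0 + yc.2)) d

theorem pv_bstep_eq (x : String) (d : PySem.Dict (String × String) Int) (yc : String × Int) :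
    (if yc.1 == x then d.insert (x, x) (d.getD (x, x) 0 + 2 * yc.2)
     else
       let fp := d.insert (x, yc.1) (d.getD (x, yc.1) 0 + yc.2)
       fp.insert (yc.1, x) (fp.getD (yc.1, x) 0 + yc.2))
    = pvGstep x d yc.1 yc.2 := by
  by_cases h : yc.1 = x
  · simp [h, pvGstep, pvBump]
  · simp [h, pvGstep, pvBump]

theorem pv_blockEq : ∀ (n : Nat) (l : List String), l.length ≤ n →
    ∀ (x : String) (d : PySem.Dict (String × String) Int), d.keys.Nodup →
      pvF x d l = pvBfold x (PySem.Dict.counter l).items d := by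
  intro n
  induction n with
  | zero =>
    intro l hl x d hnd
    have : l = [] := List.eq_nil_of_length_eq_zero (Nat.le_zero.mp hl)
    subst this
    rfl
  | succ n ih =>
    intro l hl x d hnd
    cases l with
    | nil => rfl
    | cons y r =>
      have hstep : pvF x d (y :: r) = pvF x (pvGstep x d y 1) r := rfl
      rw [hstep]
      rw [pv_pull x y r (pvGstep x d y 1) (pv_nodup_gstep _ _ _ _ hnd)
            (pv_contains_gstep_self₁ ..) (pv_contains_gstep_self₂ ..), pv_gstep_add]
      have hlen : (r.filter (fun z => z != y)).length ≤ n := by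
        have h1 := List.length_filter_le (fun z => z != y) r
        have h2 : r.length + 1 ≤ n + 1 := by simpa using hl
        omega
      rw [ih _ hlen x _ (pv_nodup_gstep _ _ _ _ hnd)]
      rw [pv_counter_cons]
      have : pvBfold x ((y, (((y :: r).count y : Nat) : Int)) :: (PySem.Dict.counter (r.filter (fun z => z != y))).items) d
           = pvBfold x (PySem.Dict.counter (r.filter (fun z => z != y))).items (pvGstep x d y (((y :: r).count y : Nat) : Int)) := by
        show pvBfold x _ _ = _
        unfold pvBfold
        rw [List.foldl_cons]
        rw [pv_bstep_eq]
      rw [this]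
      congr 1
      simp [List.count_cons_self]
      push_cast
      ring
def pvAloop (d : PySem.Dict (String × String) Int) : List String → PySem.Dict (String × String) Int
  | [] => d
  | x :: rest => pvAloop (pvF x d rest) rest

theorem pv_altBlock_eq (fp : PySem.Dict (String × String) Int) (x : String) (rest : List String) :
    pvAltBlock fp x rest = pvBfold x (PySem.Dict.counter rest).items fp := by
  unfold pvAltBlock pvBfold
  rw [PySem.Dict.foldl_insert_getD_add_one_eq_counter]

theorem pv_nodup_pvF (x : String) : ∀ (l : List String) (d : PySem.Dict (String × String) Int),
    d.keys.Nodup → (pvF x d l).keys.Nodup := by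
  intro l
  induction l with
  | nil => intro d h; exact h
  | cons z t ih => intro d h; exact ih _ (pv_nodup_gstep _ _ _ _ h)

theorem pv_block_total (x : String) (l : List String) (d : PySem.Dict (String × String) Int)
    (h : d.keys.Nodup) : pvF x d l = pvAltBlock d x l := by
  rw [pv_altBlock_eq]
  exact pv_blockEq l.length l le_rfl x d h

theorem pv_aloop_altloop : ∀ (cs : List String) (d : PySem.Dict (String × String) Int),
    d.keys.Nodup → pvAloop d cs = pvAltLoop d cs := by
  intro cs
  induction cs with
  | nil => intro d h; rfl
  | cons x t ih =>
    intro d h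
    show pvAloop (pvF x d t) t = pvAltLoop (pvAltBlock d x t) t
    rw [← pv_block_total x t d h]
    exact ih _ (pv_nodup_pvF x t d h)

theorem pv_nodup_aloop : ∀ (cs : List String) (d : PySem.Dict (String × String) Int),
    d.keys.Nodup → (pvAloop d cs).keys.Nodup := by
  intro cs
  induction cs with
  | nil => intro d h; exact h
  | cons x t ih => intro d h; exact ih _ (pv_nodup_pvF x t d h)
theorem pv_stepA_eq (x y : String) (fp : PySem.Dict (String × String) Int) :
    pvBump (pvBump fp (x, y) 1) (y, x) 1 = pvGstep x fp y 1 := by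
  by_cases h : y = x
  · subst h
    rw [pvGstep, if_pos rfl, pv_bump_bump_same]
    norm_num
  · rw [pvGstep, if_neg h]

theorem pv_F_stepA (x : String) : ∀ (l : List String) (d : PySem.Dict (String × String) Int),
    l.foldl (fun fp y => pvBump (pvBump fp (x, y) 1) (y, x) 1) d = pvF x d l := by
  intro l
  induction l with
  | nil => intro d; rfl
  | cons z t ih =>
    intro d
    rw [List.foldl_cons, ih, pv_stepA_eq]
    rfl

theorem pv_natOuter : ∀ (cs : List String) (fp : PySem.Dict (String × String) Int),
    (List.range cs.length).foldl (fun fp k =>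
      (cs.drop (k+1)).foldl (fun fp y =>
        pvBump (pvBump fp (cs.getD k "", y) 1) (y, cs.getD k "") 1) fp) fp
    = pvAloop fp cs := by
  intro cs
  induction cs with
  | nil => intro fp; rfl
  | cons x t ih =>
    intro fp
    rw [List.length_cons, List.range_succ_eq_map, List.foldl_cons, List.foldl_map]
    simp only [List.drop_succ_cons, List.getD_cons_succ, List.getD_cons_zero, List.drop_zero,
      Nat.succ_eq_add_one]
    rw [pv_F_stepA x t fp]
    exact ih (pvF x fp t)
theorem pv_inner (cs : List String) (k : Nat) (fp : PySem.Dict (String × String) Int) :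
    (PySem.List.pyRange ((k : Int) + 1) (PySem.List.len cs)).foldl (fun fp j =>
      pvBump (pvBump fp (PySem.List.pyGetD cs (k : Int) "", PySem.List.pyGetD cs j "") 1)
        (PySem.List.pyGetD cs j "", PySem.List.pyGetD cs (k : Int) "") 1) fp
    = (cs.drop (k + 1)).foldl (fun fp y =>
        pvBump (pvBump fp (cs.getD k "", y) 1) (y, cs.getD k "") 1) fp := by
  rw [PySem.List.foldl_pyRange_pyGetD cs ""
        (fun fp y => pvBump (pvBump fp (PySem.List.pyGetD cs (k : Int) "", y) 1) (y, PySem.List.pyGetD cs (k : Int) "") 1)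
        fp (by positivity)]
  simp [PySem.List.pyGetD_natCast]

theorem pv_convA (cs : List String) (fp : PySem.Dict (String × String) Int) :
    (PySem.List.pyRange 0 (PySem.List.len cs)).foldl (fun fp i =>
      (PySem.List.pyRange (i + 1) (PySem.List.len cs)).foldl (fun fp j =>
        pvBump (pvBump fp (PySem.List.pyGetD cs i "", PySem.List.pyGetD cs j "") 1)
          (PySem.List.pyGetD cs j "", PySem.List.pyGetD cs i "") 1) fp) fp
    = pvAloop fp cs := by
  rw [PySem.List.pyRange_one 0 (PySem.List.len cs), List.foldl_map]
  simp only [zero_add]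
  have hlen : (PySem.List.len cs - 0).toNat = cs.length := by simp
  rw [hlen]
  have : ∀ (k : Nat) (fp : PySem.Dict (String × String) Int),
      (PySem.List.pyRange ((k : Int) + 1) (PySem.List.len cs)).foldl (fun fp j =>
        pvBump (pvBump fp (PySem.List.pyGetD cs (k : Int) "", PySem.List.pyGetD cs j "") 1)
          (PySem.List.pyGetD cs j "", PySem.List.pyGetD cs (k : Int) "") 1) fp
      = (cs.drop (k + 1)).foldl (fun fp y =>
          pvBump (pvBump fp (cs.getD k "", y) 1) (y, cs.getD k "") 1) fp := pv_inner cs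
  simp only [this]
  exact pv_natOuter cs fp
theorem pv_top : ∀ (cp : List (String × List String)) (fp : PySem.Dict (String × String) Int),
    fp.keys.Nodup →
    cp.foldl (fun fp kv =>
      let callees_len := kv.2
      (PySem.List.pyRange 0 (PySem.List.len callees_len)).foldl (fun fp i =>
        (PySem.List.pyRange (i + 1) (PySem.List.len callees_len)).foldl (fun fp j =>
          let part1 := (PySem.List.pyGetD callees_len i "", PySem.List.pyGetD callees_len j "")
          let part2 := (PySem.List.pyGetD callees_len j "", PySem.List.pyGetD callees_len i "")
          let fp := fp.insert part1 (fp.getD part1 0 + 1)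
          fp.insert part2 (fp.getD part2 0 + 1)) fp) fp) fp
    = cp.foldl (fun fp kv => pvAltLoop fp kv.2) fp := by
  intro cp
  induction cp with
  | nil => intro fp _; rfl
  | cons kv t ih =>
    intro fp h
    rw [List.foldl_cons, List.foldl_cons]
    refine Eq.trans (congrArg (fun d => List.foldl _ d t)
      ((pv_convA kv.2 fp).trans (pv_aloop_altloop kv.2 fp h))) ?_
    apply ih
    rw [← pv_aloop_altloop kv.2 fp h]
    exact pv_nodup_aloop kv.2 fp h

-- ===== VERDICT (by name: the statement is the Claim_ definition above) =====
theorem get_frequency_pairs_spec : Claim_equal_get_frequency_pairs := by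
  intro call_pairs method_pairs _
  show get_frequency_pairs call_pairs method_pairs = get_frequency_pairs_alt call_pairs method_pairs
  exact congrArg (fun d : PySem.Dict (String × String) Int => d.items.map (fun p => (p.1.1, p.1.2, p.2)))
    (pv_top call_pairs PySem.Dict.empty (by simp [PySem.Dict.keys_empty]))
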